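-- pv_equiv track=rewrite | github.com/Shahriyar-Kh/New_Version_Feelwise-project | FastAPI_Backend/speech_analysis_fastapi.py | are_emotions_compatible
-- ===== SOURCE A (Python) =====
-- EMOTION_GROUPS = {
--     "positive": ["joy", "love", "surprise"],
--     "negative": ["anger", "sadness", "fear", "disgust"],
--     "neutral": ["neutral"]
-- }
--
-- def are_emotions_compatible(emotion1: str, emotion2: str) -> bool:
--     """Check if two emotions can be combined"""
--     if emotion1 == emotion2:
--         return True
--
--     # Check if they're in the same group
--     for group in EMOTION_GROUPS.values():
--         if emotion1 in group and emotion2 in group: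
--             return True
--
--     # Special cases: surprise can be with positive or negative
--     if "surprise" in [emotion1, emotion2]:
--         return True
--
--     return False
-- ===== SOURCE B (Python) =====
-- EMOTION_GROUPS = {
--     "positive": ["joy", "love", "surprise"],
--     "negative": ["anger", "sadness", "fear", "disgust"],
--     "neutral": ["neutral"]
-- }
--
-- GROUP_OF = {emotion: group_name
--             for group_name, members in EMOTION_GROUPS.items()
--             for emotion in members}
--
-- def are_emotions_compatible(emotion1: str, emotion2: str) -> bool:
--     """Check if two emotions can be combined"""
--     return (emotion1 == emotion2
--             or "surprise" in (emotion1, emotion2)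
--             or (emotion1 in GROUP_OF and GROUP_OF[emotion1] == GROUP_OF.get(emotion2)))
-- ===== Notes on version B (the rewrite author's own statement) =====
-- stated objective: idiomatic
-- what changed: Replaces the loop over emotion groups (with two membership scans per group) by a precomputed emotion->group reverse-lookup dict and a single boolean expression of constant-time lookups.
import Mathlib
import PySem

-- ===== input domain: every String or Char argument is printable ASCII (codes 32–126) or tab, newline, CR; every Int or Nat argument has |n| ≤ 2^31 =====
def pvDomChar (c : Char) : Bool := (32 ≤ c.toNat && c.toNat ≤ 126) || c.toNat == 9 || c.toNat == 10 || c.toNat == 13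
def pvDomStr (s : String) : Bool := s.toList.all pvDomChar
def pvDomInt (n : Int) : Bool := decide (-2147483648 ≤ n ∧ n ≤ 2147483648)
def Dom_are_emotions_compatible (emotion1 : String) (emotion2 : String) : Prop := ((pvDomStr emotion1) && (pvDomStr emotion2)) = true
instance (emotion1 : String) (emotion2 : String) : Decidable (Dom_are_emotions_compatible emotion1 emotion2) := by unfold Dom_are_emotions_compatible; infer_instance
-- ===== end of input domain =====

-- B replaces A's loop over the groups by a precomputed emotion→group reverse-lookup dict (idiomatic, constant-time lookups).

-- ===== PORT A =====
-- EMOTION_GROUPS as a Python dict (insertion order)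
def EMOTION_GROUPS : PySem.Dict String (List String) :=
  PySem.Dict.ofList [("positive", ["joy", "love", "surprise"]),
                     ("negative", ["anger", "sadness", "fear", "disgust"]),
                     ("neutral", ["neutral"])]

-- the 'for group in EMOTION_GROUPS.values(): if … return True' loop, with early return
def sameGroupLoop (groups : List (List String)) (emotion1 emotion2 : String) : Bool :=
  match groups with
  | [] => false
  | group :: rest =>
      if group.contains emotion1 && group.contains emotion2 then true
      else sameGroupLoop rest emotion1 emotion2

def are_emotions_compatible (emotion1 : String) (emotion2 : String) : Bool :=
  if emotion1 == emotion2 then true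
  else if sameGroupLoop EMOTION_GROUPS.values emotion1 emotion2 then true
  else if [emotion1, emotion2].contains "surprise" then true
  else false

-- ===== PORT B =====
-- reverse lookup: emotion → group name, built once from EMOTION_GROUPS
def GROUP_OF : PySem.Dict String String :=
  PySem.Dict.ofList [("joy", "positive"), ("love", "positive"), ("surprise", "positive"),
                     ("anger", "negative"), ("sadness", "negative"), ("fear", "negative"),
                     ("disgust", "negative"), ("neutral", "neutral")]

def are_emotions_compatible_alt (emotion1 : String) (emotion2 : String) : Bool :=
  emotion1 == emotion2
  || [emotion1, emotion2].contains "surprise"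
  || (GROUP_OF.contains emotion1 && (GROUP_OF.get? emotion1 == GROUP_OF.get? emotion2))

-- ===== PRECONDITION & SPEC =====
def Spec_are_emotions_compatible (emotion1 : String) (emotion2 : String) (out : Bool) : Prop := out = are_emotions_compatible_alt emotion1 emotion2
instance (emotion1 : String) (emotion2 : String) (out : Bool) : Decidable (Spec_are_emotions_compatible emotion1 emotion2 out) := by unfold Spec_are_emotions_compatible; infer_instance

-- ===== CLAIM (what is proved, stated in full; the proofs are below) =====
def Claim_equal_are_emotions_compatible : Prop := ∀ (emotion1 : String) (emotion2 : String), Dom_are_emotions_compatible emotion1 emotion2 → Spec_are_emotions_compatible emotion1 emotion2 (are_emotions_compatible emotion1 emotion2)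

-- ===== LEMMAS AND PROOFS =====

def pvNames : List String :=
  ["joy", "love", "surprise", "anger", "sadness", "fear", "disgust", "neutral"]

theorem pv_EG : EMOTION_GROUPS =
    PySem.Dict.mk [("positive", ["joy", "love", "surprise"]),
                   ("negative", ["anger", "sadness", "fear", "disgust"]),
                   ("neutral", ["neutral"])] := by decide

theorem pv_GO : GROUP_OF =
    PySem.Dict.mk [("joy", "positive"), ("love", "positive"), ("surprise", "positive"),
                   ("anger", "negative"), ("sadness", "negative"), ("fear", "negative"),
                   ("disgust", "negative"), ("neutral", "neutral")] := by decide

-- the loop over groups agrees with the guarded reverse-lookup test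
theorem pv_key (e1 e2 : String) :
    sameGroupLoop EMOTION_GROUPS.values e1 e2
      = (GROUP_OF.contains e1 && (GROUP_OF.get? e1 == GROUP_OF.get? e2)) := by
  by_cases h1 : e1 ∈ pvNames
  · fin_cases h1 <;>
    · by_cases h2 : e2 ∈ pvNames
      · fin_cases h2 <;> decide
      · simp only [pvNames, List.mem_cons, List.not_mem_nil, or_false, not_or] at h2
        obtain ⟨n1, n2, n3, n4, n5, n6, n7, n8⟩ := h2
        simp [pv_EG, pv_GO, sameGroupLoop, PySem.Dict.get?_mk_cons, PySem.Dict.contains_mk,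
          PySem.Dict.values_mk, PySem.Dict.get?, n1, n2, n3, n4, n5, n6, n7, n8, Ne.symm n1, Ne.symm n2, Ne.symm n3, Ne.symm n4, Ne.symm n5, Ne.symm n6, Ne.symm n7, Ne.symm n8]
  · simp only [pvNames, List.mem_cons, List.not_mem_nil, or_false, not_or] at h1
    obtain ⟨n1, n2, n3, n4, n5, n6, n7, n8⟩ := h1
    simp [pv_EG, pv_GO, sameGroupLoop, PySem.Dict.get?_mk_cons, PySem.Dict.contains_mk,
      PySem.Dict.values_mk, PySem.Dict.get?, n1, n2, n3, n4, n5, n6, n7, n8, Ne.symm n1, Ne.symm n2, Ne.symm n3, Ne.symm n4, Ne.symm n5, Ne.symm n6, Ne.symm n7, Ne.symm n8]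

-- ===== VERDICT (by name: the statement is the Claim_ definition above) =====
theorem are_emotions_compatible_spec : Claim_equal_are_emotions_compatible := by
  intro e1 e2 _
  unfold Spec_are_emotions_compatible are_emotions_compatible are_emotions_compatible_alt
  rw [pv_key]
  by_cases heq : e1 == e2 <;>
  by_cases hg : GROUP_OF.contains e1 && (GROUP_OF.get? e1 == GROUP_OF.get? e2) <;>
  by_cases hs : [e1, e2].contains "surprise" <;>
  simp [heq, hg, hs]
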